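-- pv_equiv track=rewrite | github.com/NeLy-EPFL/ballpushing_utils | src/PCA/Summary_Heatmap.py | get_pca_boundaries
-- ===== SOURCE A (Python) =====
-- def get_pca_boundaries(csv_names_block):
--     boundaries = []
--     last = None
--     for i, name in enumerate(csv_names_block):
--         pca = name.replace("_allmethods_tailored_ctrls.csv", "").replace("_allmethods_emptysplitctrl.csv", "")
--         if last is not None and pca != last:
--             boundaries.append(i)
--         last = pca
--     return boundaries
-- ===== SOURCE B (Python) =====
-- def get_pca_boundaries(csv_names_block):
--     # Run-skipping two-pointer scan: i marks the start of a maximal run of equal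
--     # stripped names, j strides to the run's end; each next run's start index is a boundary.
--     def strip(name):
--         return name.replace("_allmethods_tailored_ctrls.csv", "").replace("_allmethods_emptysplitctrl.csv", "")
--     n = len(csv_names_block)
--     boundaries = []
--     i = 0
--     while i < n:
--         head = strip(csv_names_block[i])
--         j = i + 1
--         while j < n and strip(csv_names_block[j]) == head:
--             j += 1
--         if j < n:
--             boundaries.append(j)
--         i = j
--     return boundaries
-- ===== Notes on version B (the rewrite author's own statement) =====
-- stated objective: alternative
-- what changed: Replaces A's element-by-element scan threading a 'last' accumulator with a run-skipping two-pointer scan: an outer loop strides over maximal runs of equal stripped names (an inner pointer advances past the whole run) and records each run's start index as a boundary.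
import Mathlib
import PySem

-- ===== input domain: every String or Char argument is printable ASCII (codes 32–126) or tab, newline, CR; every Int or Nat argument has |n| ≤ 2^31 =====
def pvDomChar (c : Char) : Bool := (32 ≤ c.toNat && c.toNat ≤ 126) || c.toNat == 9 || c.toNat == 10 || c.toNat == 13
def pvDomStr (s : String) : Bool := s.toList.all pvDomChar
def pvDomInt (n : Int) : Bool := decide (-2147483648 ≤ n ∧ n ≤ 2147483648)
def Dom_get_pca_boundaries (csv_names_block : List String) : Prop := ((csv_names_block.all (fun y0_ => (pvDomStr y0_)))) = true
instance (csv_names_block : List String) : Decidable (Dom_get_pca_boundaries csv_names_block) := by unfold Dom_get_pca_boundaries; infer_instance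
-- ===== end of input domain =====

-- B replaces A's element-by-element scan threading a `last` accumulator with a
-- run-skipping two-pointer scan over indices: an outer loop strides over maximal runs
-- of equal stripped names and records each run's start index. Alternative structure.

-- ===== PORT A =====
-- name.replace("_allmethods_tailored_ctrls.csv", "").replace("_allmethods_emptysplitctrl.csv", "")
def pcaStrip (name : String) : String :=
  PySem.Str.replace (PySem.Str.replace name "_allmethods_tailored_ctrls.csv" "")
    "_allmethods_emptysplitctrl.csv" ""

-- the for-loop of A: state is (boundaries, last)
def pcaLoopA (st : List Int × Option String) (p : Int × String) : List Int × Option String :=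
  let pca := pcaStrip p.2
  let bs := match st.2 with
    | some last => if pca ≠ last then st.1 ++ [p.1] else st.1
    | none => st.1
  (bs, some pca)

def get_pca_boundaries (csv_names_block : List String) : List Int :=
  ((PySem.List.enumerate csv_names_block 0).foldl pcaLoopA ([], none)).1

-- ===== PORT B =====
-- the inner while of B: `while j < n and strip(xs[j]) == head: j += 1`; returns the final j
def runTo (xs : List String) (head : String) (j : Nat) : Nat :=
  if h : j < xs.length then
    if pcaStrip xs[j] = head then runTo xs head (j + 1) else j
  else j
termination_by xs.length - j

-- termination fact for the outer loop: the inner pointer never moves backwards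
theorem runTo_ge (xs : List String) (head : String) : ∀ j, j ≤ runTo xs head j := by
  intro j
  induction hn : xs.length - j using Nat.strong_induction_on generalizing j with
  | _ n ih =>
    rw [runTo]
    split_ifs with h1 h2
    · have := ih (xs.length - (j + 1)) (by omega) (j + 1) rfl
      omega
    · exact le_refl j
    · exact le_refl j

-- the outer while of B (state: boundaries, index i); j = end of the current run
def goB (xs : List String) (bs : List Int) (i : Nat) : List Int :=
  if h : i < xs.length then
    let head := pcaStrip xs[i]
    let j := runTo xs head (i + 1)
    let bs' := if j < xs.length then bs ++ [(j : Int)] else bs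
    goB xs bs' j
  else bs
termination_by xs.length - i
decreasing_by have := runTo_ge xs (pcaStrip xs[i]) (i + 1); omega

def get_pca_boundaries_alt (csv_names_block : List String) : List Int :=
  goB csv_names_block [] 0

-- ===== PRECONDITION & SPEC =====
def Spec_get_pca_boundaries (csv_names_block : List String) (out : List Int) : Prop := out = get_pca_boundaries_alt csv_names_block
instance (csv_names_block : List String) (out : List Int) : Decidable (Spec_get_pca_boundaries csv_names_block out) := by unfold Spec_get_pca_boundaries; infer_instance

-- ===== CLAIM (what is proved, stated in full; the proofs are below) =====
def Claim_equal_get_pca_boundaries : Prop := ∀ (csv_names_block : List String), Dom_get_pca_boundaries csv_names_block → Spec_get_pca_boundaries csv_names_block (get_pca_boundaries csv_names_block)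

-- ===== LEMMAS AND PROOFS =====

-- common characterisation: boundary indices from comparing each stripped element to the previous one
def diffs (prev : String) : List String → Int → List Int
  | [], _ => []
  | x :: t, i => (if pcaStrip x ≠ prev then [i] else []) ++ diffs (pcaStrip x) t (i + 1)

-- A's loop, started with last = some prev, computes diffs
theorem loopA_eq_diffs (t : List String) (i : Int) (prev : String) (bs : List Int) :
    ((PySem.List.enumerate t i).foldl pcaLoopA (bs, some prev)).1 = bs ++ diffs prev t i := by
  induction t generalizing i prev bs with
  | nil => simp [PySem.List.enumerate_nil, diffs]
  | cons n t ih =>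
    simp only [PySem.List.enumerate_cons, List.foldl_cons, diffs]
    rw [show pcaLoopA (bs, some prev) (i, n)
        = ((if pcaStrip n ≠ prev then bs ++ [i] else bs), some (pcaStrip n)) from rfl]
    split_ifs with h <;> simp [ih]

-- length of the leading run of `head` in a list
def runLen (head : String) : List String → Nat
  | [] => 0
  | x :: t => if pcaStrip x = head then runLen head t + 1 else 0

theorem runLen_le (h : String) (t : List String) : runLen h t ≤ t.length := by
  induction t with
  | nil => simp [runLen]
  | cons x t ih => simp only [runLen]; split_ifs <;> simp; omega

-- the inner while ends exactly runLen past its start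
theorem runTo_eq (xs : List String) (head : String) : ∀ j,
    runTo xs head j = j + runLen head (xs.drop j) := by
  intro j
  induction hn : xs.length - j using Nat.strong_induction_on generalizing j with
  | _ n ih =>
    rw [runTo]
    split_ifs with h1 h2
    · rw [ih (xs.length - (j + 1)) (by omega) (j + 1) rfl]
      rw [List.drop_eq_getElem_cons h1]
      simp only [runLen, if_pos h2]
      omega
    · rw [List.drop_eq_getElem_cons h1]
      simp [runLen, h2]
    · rw [List.drop_eq_nil_iff.mpr (by omega)]
      simp [runLen]
-- diffs emits nothing along the leading run
theorem diffs_drop_run (t : List String) (h : String) (i : Int) :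
    diffs h t i = diffs h (t.drop (runLen h t)) (i + (runLen h t : Int)) := by
  induction t generalizing i with
  | nil => simp [runLen]
  | cons x t ih =>
    by_cases hx : pcaStrip x = h
    · have h1 : runLen h (x :: t) = runLen h t + 1 := by simp [runLen, hx]
      have h2 : diffs h (x :: t) i = diffs h t (i + 1) := by simp [diffs, hx]
      have hcast : i + ((runLen h t + 1 : Nat) : Int) = (i + 1) + (runLen h t : Int) := by
        push_cast; ring
      rw [h1, hcast, List.drop_succ_cons, h2, ih]
    · simp [runLen, hx]

-- the first element after the leading run (if any) differs
theorem drop_run_head (t : List String) (h : String) :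
    ∀ y t', t.drop (runLen h t) = y :: t' → pcaStrip y ≠ h := by
  induction t with
  | nil => intro y t' hy; simp [runLen] at hy
  | cons x t ih =>
    intro y t' hy
    by_cases hx : pcaStrip x = h
    · simp only [runLen, if_pos hx, List.drop_succ_cons] at hy
      exact ih y t' hy
    · simp only [runLen, if_neg hx, List.drop_zero] at hy
      cases hy; exact hx

-- B's outer loop computes diffs
theorem goB_eq_diffs (xs : List String) : ∀ (n i : Nat), xs.length - i ≤ n →
    ∀ (hi : i < xs.length) (bs : List Int),
    goB xs bs i = bs ++ diffs (pcaStrip xs[i]) (xs.drop (i + 1)) ((i : Int) + 1) := by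
  intro n
  induction n with
  | zero => intro i hle hi bs; omega
  | succ n ih =>
    intro i hle hi bs
    rw [goB.eq_def, dif_pos hi]
    simp only []
    rw [runTo_eq xs (pcaStrip xs[i]) (i + 1)]
    rw [diffs_drop_run (xs.drop (i + 1)) (pcaStrip xs[i]) ((i : Int) + 1)]
    have hdd : (xs.drop (i + 1)).drop (runLen (pcaStrip xs[i]) (xs.drop (i + 1)))
        = xs.drop (i + 1 + runLen (pcaStrip xs[i]) (xs.drop (i + 1))) := by
      rw [List.drop_drop]
    have hml := runLen_le (pcaStrip xs[i]) (xs.drop (i + 1))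
    have hlen : (xs.drop (i + 1)).length = xs.length - (i + 1) := by simp
    by_cases hj : i + 1 + runLen (pcaStrip xs[i]) (xs.drop (i + 1)) < xs.length
    · -- a next run exists: record its start index and recurse
      rw [if_pos hj]
      have hdropj : xs.drop (i + 1 + runLen (pcaStrip xs[i]) (xs.drop (i + 1)))
          = xs[i + 1 + runLen (pcaStrip xs[i]) (xs.drop (i + 1))]
            :: xs.drop (i + 1 + runLen (pcaStrip xs[i]) (xs.drop (i + 1)) + 1) :=
        List.drop_eq_getElem_cons hj
      have hy : pcaStrip xs[i + 1 + runLen (pcaStrip xs[i]) (xs.drop (i + 1))]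
          ≠ pcaStrip xs[i] := by
        apply drop_run_head (xs.drop (i + 1)) (pcaStrip xs[i])
          xs[i + 1 + runLen (pcaStrip xs[i]) (xs.drop (i + 1))]
          (xs.drop (i + 1 + runLen (pcaStrip xs[i]) (xs.drop (i + 1)) + 1))
        rw [hdd, hdropj]
      rw [ih _ (by omega) hj]
      rw [hdd, hdropj]
      simp only [diffs, if_pos hy]
      have hcast : ((i : Int) + 1) + ((runLen (pcaStrip xs[i]) (xs.drop (i + 1)) : Nat) : Int)
          = ((i + 1 + runLen (pcaStrip xs[i]) (xs.drop (i + 1)) : Nat) : Int) := by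
        push_cast; ring
      rw [hcast]
      simp
    · -- the run reaches the end: nothing to record, the loop exits
      rw [if_neg hj]
      rw [goB.eq_def, dif_neg (by omega)]
      rw [hdd, List.drop_eq_nil_iff.mpr (by omega)]
      simp [diffs]

theorem get_pca_boundaries_eq (xs : List String) :
    get_pca_boundaries xs = get_pca_boundaries_alt xs := by
  cases hxs : xs with
  | nil =>
    simp [get_pca_boundaries, get_pca_boundaries_alt, goB, PySem.List.enumerate_nil]
  | cons x t =>
    unfold get_pca_boundaries get_pca_boundaries_alt
    simp only [PySem.List.enumerate_cons, List.foldl_cons]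
    rw [show pcaLoopA ([], none) (0, x) = ([], some (pcaStrip x)) from rfl]
    rw [loopA_eq_diffs]
    rw [goB_eq_diffs (x :: t) (x :: t).length 0 (by omega) (by simp) []]
    simp

-- ===== VERDICT (by name: the statement is the Claim_ definition above) =====
theorem get_pca_boundaries_spec : Claim_equal_get_pca_boundaries := by
  intro xs _
  unfold Spec_get_pca_boundaries
  exact get_pca_boundaries_eq xs
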